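-- pv_equiv track=rewrite | github.com/Architolb/hw-week2 | word_game/word_game.py | letter_place
-- ===== SOURCE A (Python) =====
-- def letter_place(guess, word, spaces):
--     index = -2
--     while index != -1:
--         if guess in word:
--             index = word.find(guess)
--             removed_character = '*'
--             word = word[:index]+removed_character+word[index+1:]
--             spaces[index] = guess
--         else:
--             index = -1
--
--     return (word, spaces)
-- ===== SOURCE B (Python) =====
-- def letter_place(guess, word, spaces):
--     # Single linear scan over the original word: star every occurrence start,
--     # record the guess in spaces there.  (Mutates spaces in place, like A.)
--     k = len(guess)
--     chars = list(word)
--     for i in range(len(word) - k + 1):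
--         if word[i:i + k] == guess:
--             chars[i] = '*'
--             spaces[i] = guess
--     return (''.join(chars), spaces)
-- ===== Notes on version B (the rewrite author's own statement) =====
-- stated objective: alternative
-- what changed: A repeatedly re-searches the shrinking word with 'in'/find and rebuilds the whole string by slicing for every hit; B does one linear scan over the original word, starring each occurrence start and setting spaces there (O(n*k) worst case vs A's O(occurrences*n); on random inputs with few matches the measured times are similar).
import Mathlib
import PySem

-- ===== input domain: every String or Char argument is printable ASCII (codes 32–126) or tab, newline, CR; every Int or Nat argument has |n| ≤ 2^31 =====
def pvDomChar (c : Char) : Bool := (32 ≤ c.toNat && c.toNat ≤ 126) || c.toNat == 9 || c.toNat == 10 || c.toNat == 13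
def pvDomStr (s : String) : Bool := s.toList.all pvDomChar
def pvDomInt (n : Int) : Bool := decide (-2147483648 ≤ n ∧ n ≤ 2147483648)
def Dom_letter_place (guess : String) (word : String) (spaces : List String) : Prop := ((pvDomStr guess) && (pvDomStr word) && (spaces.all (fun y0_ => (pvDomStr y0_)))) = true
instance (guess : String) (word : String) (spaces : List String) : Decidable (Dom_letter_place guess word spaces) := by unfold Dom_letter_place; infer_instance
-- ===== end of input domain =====

-- B replaces A's repeated find-and-rebuild loop by one linear scan over the original word
-- (objective: alternative).  Both A and B mutate `spaces` in place in Python; the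
-- equivalence proved here is about the returned pair.

-- ===== PORT A =====
-- A's while-loop: re-search the current word, star the first match, set spaces there.
-- The fuel argument only makes the recursion total; under Pre_ the loop exits before
-- the fuel (word.length + 2) runs out, exactly as Python's loop terminates there.
def lpLoopA (guess : String) (g : List Char) : Nat → List Char → List String → List Char × List String
  | 0, w, sp => (w, sp)
  | fuel+1, w, sp =>
    if PySem.Chars.isIn g w then
      let i := PySem.Chars.find w g
      let w' := PySem.List.slice w none (some i) ++ ['*'] ++ PySem.List.slice w (some (i+1)) none
      -- spaces[index] = guess : exact when index < len(spaces) (Pre_ guarantees it; Python raises IndexError otherwise)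
      let sp' := sp.set i.toNat guess
      lpLoopA guess g fuel w' sp'
    else (w, sp)

def letter_place (guess : String) (word : String) (spaces : List String) : String × List String :=
  let r := lpLoopA guess guess.toList (word.toList.length + 2) word.toList spaces
  (String.ofList r.1, r.2)

-- ===== PORT B =====
def letter_place_alt (guess : String) (word : String) (spaces : List String) : String × List String :=
  let g := guess.toList
  let w := word.toList
  let k : Int := g.length
  let r := (PySem.List.pyRange 0 ((w.length : Int) - k + 1)).foldl
      (fun (p : List Char × List String) i =>
        if PySem.List.slice w (some i) (some (i + k)) = g then
          -- chars[i] = '*' / spaces[i] = guess : exact when i < length (Pre_ guarantees it)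
          (p.1.set i.toNat '*', p.2.set i.toNat guess)
        else p) (w, spaces)
  (String.ofList r.1, r.2)

-- ===== PRECONDITION & SPEC =====
-- Pre_ excludes: the empty guess (A loops forever or raises IndexError); a guess containing
-- the sentinel '*' that occurs in the word (A's replacement loop then re-matches its own '*'
-- markers: it loops forever or cascades to a value driven by the sentinel); and words with a
-- match position ≥ len(spaces) (A raises IndexError there).
def Pre_letter_place (guess : String) (word : String) (spaces : List String) : Prop :=
  guess.toList ≠ [] ∧
  ('*' ∈ guess.toList → ¬ guess.toList <:+: word.toList) ∧
  ∀ i : Nat, i < word.toList.length → guess.toList <+: word.toList.drop i → i < spaces.length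
instance (guess : String) (word : String) (spaces : List String) : Decidable (Pre_letter_place guess word spaces) := by unfold Pre_letter_place; infer_instance

def pvWitness_letter_place : String × String × List String := ("a", "banana", ["_", "_", "_", "_", "_", "_"])

def Spec_letter_place (guess : String) (word : String) (spaces : List String) (out : String × List String) : Prop := out = letter_place_alt guess word spaces
instance (guess : String) (word : String) (spaces : List String) (out : String × List String) : Decidable (Spec_letter_place guess word spaces out) := by unfold Spec_letter_place; infer_instance

-- ===== CLAIM (what is proved, stated in full; the proofs are below) =====
def Claim_equal_letter_place : Prop := ∀ (guess : String) (word : String) (spaces : List String), Dom_letter_place guess word spaces → Pre_letter_place guess word spaces → Spec_letter_place guess word spaces (letter_place guess word spaces)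

-- ===== LEMMAS AND PROOFS =====

-- the common normal form: star every occurrence start of g in w, put gs into sp there
def starred (g w : List Char) : List Char :=
  w.mapIdx fun p c => if g <+: w.drop p then '*' else c

def marked (g : List Char) (gs : String) (w : List Char) (sp : List String) : List String :=
  sp.mapIdx fun p s => if g <+: w.drop p then gs else s

def occCnt (g w : List Char) : Nat :=
  ((Finset.range w.length).filter (fun i => g <+: w.drop i)).card

lemma starred_getElem? (g w : List Char) (p : Nat) :
    (starred g w)[p]? = if g <+: w.drop p ∧ p < w.length then some '*' else w[p]? := by
  by_cases hp : p < w.length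
  · rw [List.getElem?_eq_getElem (by simpa [starred] using hp), List.getElem?_eq_getElem hp]
    simp only [starred, List.getElem_mapIdx]
    by_cases h : g <+: w.drop p <;> simp [h, hp]
  · have h1 : (starred g w)[p]? = none := by
      simp [starred]; omega
    have h2 : w[p]? = none := by simp [List.getElem?_eq_none_iff]; omega
    simp [h1, h2]
    intro _
    omega

lemma marked_getElem? (g : List Char) (gs : String) (w : List Char) (sp : List String) (p : Nat) :
    (marked g gs w sp)[p]? = if g <+: w.drop p ∧ p < sp.length then some gs else sp[p]? := by
  by_cases hp : p < sp.length
  · rw [List.getElem?_eq_getElem (by simpa [marked] using hp), List.getElem?_eq_getElem hp]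
    simp only [marked, List.getElem_mapIdx]
    by_cases h : g <+: w.drop p <;> simp [h, hp]
  · have h1 : (marked g gs w sp)[p]? = none := by
      simp [marked]; omega
    have h2 : sp[p]? = none := by simp [List.getElem?_eq_none_iff]; omega
    simp [h1, h2]
    intro _
    omega

-- an occurrence forces the index strictly inside the word (g nonempty)
lemma occ_lt_length {g w : List Char} (hg : g ≠ []) {j : Nat} (h : g <+: w.drop j) :
    j + g.length ≤ w.length := by
  have := h.length_le
  have hlen : (w.drop j).length = w.length - j := List.length_drop ..
  have : g.length ≤ w.length - j := by omega
  rcases Nat.lt_or_ge j w.length with hj | hj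
  · omega
  · exfalso
    have : w.drop j = [] := List.drop_eq_nil_of_le hj
    rw [this] at h
    exact hg (List.prefix_nil.mp h)

-- occurrences of g in w, stated through getElem?
lemma occ_iff_getElem? (g w : List Char) (j : Nat) :
    g <+: w.drop j ↔ ∀ (m : Nat) (h : m < g.length), w[j + m]? = some g[m] := by
  rw [List.prefix_iff_getElem?]
  constructor
  · intro H m h
    have := H m h
    rwa [List.getElem?_drop] at this
  · intro H m h
    rw [List.getElem?_drop]
    exact H m h

-- starring the FIRST occurrence start kills exactly that occurrence ('*' never occurs in g)
lemma occ_set {g w : List Char} {n : Nat} (hg : g ≠ []) (hs : '*' ∉ g)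
    (hn : n < w.length) (hocc : g <+: w.drop n) (hmin : ∀ i < n, ¬ g <+: w.drop i) (j : Nat) :
    g <+: (w.set n '*').drop j ↔ (g <+: w.drop j ∧ j ≠ n) := by
  have hglen : 0 < g.length := List.length_pos_iff.mpr hg
  constructor
  · intro h
    rw [occ_iff_getElem?] at h
    have hjn : j ≠ n := by
      intro hjn; subst hjn
      have h0 := h 0 hglen
      rw [Nat.add_zero, List.getElem?_set] at h0
      simp [hn] at h0
      exact hs (h0 ▸ List.getElem_mem hglen)
    refine ⟨(occ_iff_getElem? g w j).mpr ?_, hjn⟩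
    intro m hm
    have hjm := h m hm
    rw [List.getElem?_set] at hjm
    by_cases hcase : n = j + m
    · exfalso
      simp [hcase] at hjm
      have hmem := List.getElem_mem hm
      rw [← hjm.2] at hmem
      exact hs hmem
    · simpa [hcase] using hjm
  · rintro ⟨h, hjn⟩
    have hnj : n < j := by
      rcases Nat.lt_or_ge n j with h1 | h1
      · exact h1
      · exact absurd h (hmin j (by omega))
    rw [occ_iff_getElem?] at h ⊢
    intro m hm
    rw [List.getElem?_set]
    have : n ≠ j + m := by omega
    simpa [this] using h m hm

lemma starred_of_no_occ {g w : List Char} (h : ∀ j, ¬ g <+: w.drop j) : starred g w = w := by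
  apply List.ext_getElem?
  intro p
  rw [starred_getElem?]
  simp [h p]

lemma marked_of_no_occ {g : List Char} {gs : String} {w : List Char} {sp : List String}
    (h : ∀ j, ¬ g <+: w.drop j) : marked g gs w sp = sp := by
  apply List.ext_getElem?
  intro p
  rw [marked_getElem?]
  simp [h p]

-- the A-side loop computes the normal form, given enough fuel
lemma lpLoopA_eq (guess : String) (hg : guess.toList ≠ []) (hs : '*' ∉ guess.toList) :
    ∀ (fuel : Nat) (w : List Char) (sp : List String), occCnt guess.toList w < fuel →
      lpLoopA guess guess.toList fuel w sp = (starred guess.toList w, marked guess.toList guess w sp) := by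
  set g := guess.toList with hgdef
  intro fuel
  induction fuel with
  | zero => intro w sp h; omega
  | succ fuel ih =>
    intro w sp hcnt
    rw [lpLoopA]
    by_cases hin : PySem.Chars.isIn g w = true
    · simp only [hin, if_true]
      -- the found index
      have hinfix : g <:+: w := (PySem.Chars.isIn_iff_infix g w).mp hin
      have hpos : 0 ≤ PySem.Chars.find w g := (PySem.Chars.find_nonneg_iff w g).mpr hinfix
      obtain ⟨hocc, hmin⟩ := PySem.Chars.find_spec hpos
      set i := PySem.Chars.find w g with hidef
      set n := i.toNat with hndef
      have hglen : 0 < g.length := List.length_pos_iff.mpr hg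
      have hnlen : n < w.length := by have := occ_lt_length hg hocc; omega
      -- the rebuilt word is w.set n '*'
      have hw' : PySem.List.slice w none (some i) ++ ['*'] ++ PySem.List.slice w (some (i+1)) none
          = w.set n '*' := by
        rw [PySem.List.slice_to w hpos, PySem.List.slice_from w (by omega : (0:Int) ≤ i + 1),
          List.set_eq_take_append_cons_drop, if_pos hnlen]
        have h1 : (i + 1).toNat = n + 1 := by omega
        rw [h1, ← hndef]
        simp
      rw [hw']
      -- occurrence structure of the new word
      have hocc' : ∀ j, g <+: (w.set n '*').drop j ↔ (g <+: w.drop j ∧ j ≠ n) :=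
        occ_set hg hs hnlen hocc hmin
      -- the occurrence count drops by one
      have hfilter : (Finset.range (w.set n '*').length).filter (fun j => g <+: (w.set n '*').drop j)
          = ((Finset.range w.length).filter (fun j => g <+: w.drop j)).erase n := by
        ext j
        simp only [Finset.mem_filter, Finset.mem_erase, Finset.mem_range, List.length_set]
        constructor
        · rintro ⟨hj, hjo⟩
          have := (hocc' j).mp hjo
          exact ⟨this.2, hj, this.1⟩
        · rintro ⟨hjn, hj, hjo⟩
          exact ⟨hj, (hocc' j).mpr ⟨hjo, hjn⟩⟩
      have hnmem : n ∈ (Finset.range w.length).filter (fun j => g <+: w.drop j) := by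
        simp [Finset.mem_filter, hnlen, hocc]
      have hcnt' : occCnt g (w.set n '*') = occCnt g w - 1 := by
        unfold occCnt
        rw [hfilter, Finset.card_erase_of_mem hnmem]
      have hcntpos : 0 < occCnt g w := Finset.card_pos.mpr ⟨n, hnmem⟩
      -- recurse
      rw [ih (w.set n '*') (sp.set n guess) (by omega)]
      -- the normal form is unchanged by the step
      have e1 : starred g (w.set n '*') = starred g w := by
        apply List.ext_getElem?
        intro p
        rw [starred_getElem?, starred_getElem?]
        simp only [hocc' p, List.length_set, List.getElem?_set]
        by_cases hpn : p = n
        · subst hpn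
          simp [hocc, hnlen]
        · by_cases hpo : g <+: w.drop p <;> simp [hpo, hpn, Ne.symm hpn]
      have e2 : marked g guess (w.set n '*') (sp.set n guess) = marked g guess w sp := by
        apply List.ext_getElem?
        intro p
        rw [marked_getElem?, marked_getElem?]
        simp only [hocc' p, List.length_set, List.getElem?_set]
        by_cases hpn : p = n
        · subst hpn
          by_cases hsp : n < sp.length
          · simp [hocc, hsp]
          · simp [hocc, hsp]
        · by_cases hpo : g <+: w.drop p <;> simp [hpo, hpn, Ne.symm hpn]
      rw [e1, e2]
    · simp only [Bool.not_eq_true] at hin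
      simp only [hin]
      have hno : ∀ j, ¬ g <+: w.drop j := by
        intro j hj
        have : ∃ j, g <+: w.drop j := ⟨j, hj⟩
        rw [PySem.Chars.exists_prefix_drop_iff_isIn] at this
        simp [hin] at this
      rw [starred_of_no_occ hno, marked_of_no_occ hno]
      simp

-- splitting B's fold over the pair into its two components
lemma foldl_pair_setIf {α β : Type} (t : Nat → Bool) (x : α) (y : β) :
    ∀ (L : List Nat) (c : List α) (s : List β),
      L.foldl (fun p i => if t i then (p.1.set i x, p.2.set i y) else p) (c, s)
      = (L.foldl (fun a i => if t i then a.set i x else a) c,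
         L.foldl (fun a i => if t i then a.set i y else a) s) := by
  intro L
  induction L with
  | nil => intro c s; rfl
  | cons i L ih =>
    intro c s
    simp only [List.foldl_cons]
    by_cases h : t i <;> simp only [h, if_true] <;> exact ih ..

-- what a conditional-set fold leaves at each position
lemma foldl_setIf_getElem? {α : Type} (x : α) (t : Nat → Bool) :
    ∀ (L : List Nat) (init : List α) (p : Nat),
      (L.foldl (fun a i => if t i then a.set i x else a) init)[p]? =
      if p ∈ L ∧ t p then (if p < init.length then some x else none) else init[p]? := by
  intro L
  induction L with
  | nil => intro init p; simp
  | cons i L ih =>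
    intro init p
    simp only [List.foldl_cons]
    rw [ih]
    have hlen : (if t i then init.set i x else init).length = init.length := by
      by_cases h : t i <;> simp [h]
    rw [hlen]
    by_cases hmem : p ∈ L ∧ t p
    · simp [hmem, List.mem_cons]
    · simp only [hmem, if_false]
      by_cases hpi : p = i
      · subst hpi
        by_cases ht : t p
        · simp [ht, List.getElem?_set]
        · simp [ht]
      · have : ¬ (p ∈ i :: L ∧ t p) := by
          intro ⟨hm, ht⟩
          rcases List.mem_cons.mp hm with h | h
          · exact hpi h
          · exact hmem ⟨h, ht⟩
        simp only [this, if_false]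
        by_cases ht : t i <;> simp [ht, Ne.symm hpi]

lemma take_len_eq_iff_prefix (g l : List Char) : l.take g.length = g ↔ g <+: l := by
  rw [List.prefix_iff_eq_take]
  exact eq_comm

-- the B-side scan computes the same normal form (guess nonempty)
lemma alt_eq (guess word : String) (spaces : List String) (hg : guess.toList ≠ []) :
    letter_place_alt guess word spaces
      = (String.ofList (starred guess.toList word.toList),
         marked guess.toList guess word.toList spaces) := by
  set g := guess.toList with hgdef
  set w := word.toList with hwdef
  have hglen : 0 < g.length := List.length_pos_iff.mpr hg
  simp only [letter_place_alt, PySem.List.pyRange_one]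
  simp only [Int.sub_zero, List.foldl_map]
  set N := ((w.length : Int) - (g.length : Int) + 1).toNat with hN
  have hstep : (fun (p : List Char × List String) (m : Nat) =>
        if PySem.List.slice w (some ((0:Int) + (m:Int))) (some ((0:Int) + (m:Int) + (g.length : Int))) = g
        then (p.1.set ((0:Int) + (m:Int)).toNat '*', p.2.set ((0:Int) + (m:Int)).toNat guess) else p)
      = (fun (p : List Char × List String) (m : Nat) =>
        if decide (g <+: w.drop m) then (p.1.set m '*', p.2.set m guess) else p) := by
    funext p m
    rw [Int.zero_add, PySem.List.slice_natCast_add w m g.length]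
    by_cases h : g <+: List.drop m w
    · simp [(take_len_eq_iff_prefix g (List.drop m w)).mpr h, h]
    · have hne : List.take g.length (List.drop m w) ≠ g :=
        fun hc => h ((take_len_eq_iff_prefix g (List.drop m w)).mp hc)
      simp [hne, h]
  rw [hstep, foldl_pair_setIf (fun m => decide (g <+: w.drop m)) '*' guess (List.range N) w spaces]
  have hocc_range : ∀ p : Nat, g <+: w.drop p → p < N ∧ p < w.length := by
    intro p hp
    have := occ_lt_length hg hp
    constructor
    · omega
    · omega
  rw [Prod.mk.injEq]
  refine ⟨?_, ?_⟩
  · show String.ofList _ = String.ofList _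
    congr 1
    apply List.ext_getElem?
    intro p
    rw [foldl_setIf_getElem?, starred_getElem?]
    by_cases hp : g <+: w.drop p
    · obtain ⟨h1, h2⟩ := hocc_range p hp
      simp [hp, h1, h2, List.mem_range]
    · simp [hp]
  · show _ = marked g guess w spaces
    apply List.ext_getElem?
    intro p
    rw [foldl_setIf_getElem?, marked_getElem?]
    by_cases hp : g <+: w.drop p
    · obtain ⟨h1, _⟩ := hocc_range p hp
      by_cases hsp : p < spaces.length
      · simp [hp, h1, hsp, List.mem_range]
      · simp [hp, h1, hsp, List.mem_range]
    · simp [hp]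

lemma occCnt_lt_fuel (g w : List Char) : occCnt g w < w.length + 2 := by
  have : occCnt g w ≤ w.length := by
    unfold occCnt
    calc ((Finset.range w.length).filter _).card ≤ (Finset.range w.length).card :=
          Finset.card_filter_le _ _
      _ = w.length := Finset.card_range _
  omega

-- ===== VERDICT (by name: the statement is the Claim_ definition above) =====
theorem letter_place_spec : Claim_equal_letter_place := by
  intro guess word spaces _hdom hpre
  obtain ⟨hg, hstar, _hsp⟩ := hpre
  show letter_place guess word spaces = letter_place_alt guess word spaces
  rw [alt_eq guess word spaces hg]
  unfold letter_place
  by_cases hs : '*' ∈ guess.toList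
  · -- guess contains '*': Pre_ says it does not occur in word, so both sides are the input
    have hnoinfix := hstar hs
    have hno : ∀ j, ¬ guess.toList <+: word.toList.drop j := by
      intro j hj
      exact hnoinfix (hj.isInfix.trans (List.drop_suffix j word.toList).isInfix)
    have hin : PySem.Chars.isIn guess.toList word.toList = false := by
      rw [PySem.Chars.isIn_eq_false_iff]
      exact hnoinfix
    rw [starred_of_no_occ hno, marked_of_no_occ hno]
    rw [lpLoopA]
    simp [hin]
  · rw [lpLoopA_eq guess hg hs (word.toList.length + 2) word.toList spaces
      (occCnt_lt_fuel guess.toList word.toList)]
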